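-- pv_equiv track=rewrite | github.com/Suhruth9/Spoken_to_Written | spoken2written/processing_text.py | some_name
-- ===== SOURCE A (Python) =====
-- t = {"single": 1, "double": 2, "triple": 3}
--
-- def rem_elems(text_list, r):
--     for i in range(len(r)):
--         text_list.pop(r[i] - i)
--
--     return (text_list)
--
-- def some_name(text_list):
--     r = []
--     for i in range(len(text_list)-1):
--         p = t.get(text_list[i], None)
--         if p!= None and (text_list[i+1].isupper() or text_list[i+1] == 'a'):
--             text_list[i] = (text_list[i+1].upper())*p
--             r.append(i+1)
--
--     text_list = rem_elems(text_list, r)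
--
--     return (text_list)
-- ===== SOURCE B (Python) =====
-- t = {"single": 1, "double": 2, "triple": 3}
--
-- def some_name(text_list):
--     # One pass: emit expanded token and skip the consumed next token,
--     # instead of marking indices and repeatedly popping them afterwards.
--     # (Unlike A, this does not mutate its argument; return value is identical.)
--     out = []
--     n = len(text_list)
--     i = 0
--     while i < n:
--         tok = text_list[i]
--         p = t.get(tok)
--         if p is not None and i + 1 < n and (text_list[i+1].isupper() or text_list[i+1] == 'a'):
--             out.append(text_list[i+1].upper() * p)
--             i += 2
--         else:
--             out.append(tok)
--             i += 1
--     return out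
-- ===== Notes on version B (the rewrite author's own statement) =====
-- stated objective: alternative
-- what changed: A marks consumed indices and then removes them with repeated list.pop in a second phase, mutating the input; B builds the result in a single left-to-right pass that emits the expanded token and skips the consumed one. It avoids A's O(n) pops (quadratic when many tokens are consumed), but on random inputs removals are rare and the measured times are comparable.
import Mathlib
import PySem

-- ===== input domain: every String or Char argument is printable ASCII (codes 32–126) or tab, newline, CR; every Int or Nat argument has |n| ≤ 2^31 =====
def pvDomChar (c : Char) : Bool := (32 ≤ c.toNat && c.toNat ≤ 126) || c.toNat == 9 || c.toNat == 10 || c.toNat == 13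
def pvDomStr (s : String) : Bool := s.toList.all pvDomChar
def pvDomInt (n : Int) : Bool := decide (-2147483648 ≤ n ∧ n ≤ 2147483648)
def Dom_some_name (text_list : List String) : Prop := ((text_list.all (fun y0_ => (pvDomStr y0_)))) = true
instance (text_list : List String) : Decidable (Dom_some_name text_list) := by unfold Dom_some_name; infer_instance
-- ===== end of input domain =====

-- B replaces A's mark-indices-then-repeated-pop scheme by a single pass that emits the
-- expanded token and skips the consumed one (same return value; note A mutates its
-- argument list in place while B builds a fresh list — the equivalence proved here is
-- about the return value).

-- ===== PORT A =====
-- the module constant t = {"single": 1, "double": 2, "triple": 3}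
def tDict : PySem.Dict String Int :=
  PySem.Dict.ofList [("single", 1), ("double", 2), ("triple", 3)]

-- hand port of str.isupper (exact on the ASCII domain): at least one cased character
-- and no lowercase character
def strIsupper (s : String) : Bool :=
  (s.toList.any (fun c => PySem.Chars.isupper c || PySem.Chars.islower c)) &&
  (s.toList.all (fun c => !PySem.Chars.islower c))

-- hand port of string repetition s * p (exact for p ≥ 0; here p ∈ {1,2,3})
def strMul (s : String) (p : Int) : String :=
  PySem.Str.join "" (List.replicate p.toNat s)

-- the body of A's marking loop (indices are always in range, so pyGetD/pySetD are exact)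
def stepA (st : List String × List Int) (i : Int) : List String × List Int :=
  match tDict.get? (PySem.List.pyGetD st.1 i "") with
  | none => st
  | some p =>
    let nxt := PySem.List.pyGetD st.1 (i + 1) ""
    if strIsupper nxt || nxt == "a" then
      (PySem.List.pySetD st.1 i (strMul (PySem.Str.upper nxt) p), st.2 ++ [i + 1])
    else st

-- rem_elems: for i in range(len(r)): text_list.pop(r[i] - i)  (pop is always in range here;
-- the none branch keeps the list, it is never taken)
def remElems (tl : List String) (r : List Int) : List String :=
  (PySem.List.pyRange 0 (r.length : Int) 1).foldl
    (fun tl i =>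
      match PySem.List.pop? tl (PySem.List.pyGetD r i 0 - i) with
      | some pr => pr.2
      | none => tl) tl

def some_name (text_list : List String) : List String :=
  let st := (PySem.List.pyRange 0 ((text_list.length : Int) - 1) 1).foldl stepA (text_list, [])
  remElems st.1 st.2

-- ===== PORT B =====
-- the while loop of Source B: i advances by 2 after an expansion, else by 1
def altGo (xs : List String) (n : Nat) (i : Nat) : List String :=
  if h : i < n then
    let tok := PySem.List.pyGetD xs (i : Int) ""
    match tDict.get? tok with
    | some p =>
      let nxt := PySem.List.pyGetD xs ((i : Int) + 1) ""
      if decide (i + 1 < n) && (strIsupper nxt || nxt == "a") then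
        strMul (PySem.Str.upper nxt) p :: altGo xs n (i + 2)
      else
        tok :: altGo xs n (i + 1)
    | none => tok :: altGo xs n (i + 1)
  else []
termination_by n - i

def some_name_alt (text_list : List String) : List String :=
  altGo text_list text_list.length 0

-- ===== PRECONDITION & SPEC =====
def Spec_some_name (text_list : List String) (out : List String) : Prop := out = some_name_alt text_list
instance (text_list : List String) (out : List String) : Decidable (Spec_some_name text_list out) := by unfold Spec_some_name; infer_instance

-- ===== CLAIM (what is proved, stated in full; the proofs are below) =====
def Claim_equal_some_name : Prop := ∀ (text_list : List String), Dom_some_name text_list → Spec_some_name text_list (some_name text_list)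

-- ===== LEMMAS AND PROOFS =====

-- A's marking loop as a structural recursion over the yet-unprocessed suffix
-- (k = absolute index of the suffix head); returns the rewritten suffix and
-- the absolute indices marked for removal.
def phase1S : List String → Int → (List String × List Int)
  | [], _ => ([], [])
  | [x], _ => ([x], [])
  | x :: y :: rest, k =>
    match tDict.get? x with
    | some p =>
      if strIsupper y || y == "a" then
        let pr := phase1S rest (k + 2)
        (strMul (PySem.Str.upper y) p :: y :: pr.1, (k + 1) :: pr.2)
      else
        let pr := phase1S (y :: rest) (k + 1)
        (x :: pr.1, pr.2)
    | none =>
      let pr := phase1S (y :: rest) (k + 1)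
      (x :: pr.1, pr.2)
termination_by xs _ => xs.length

-- the common value of both programs
def answer : List String → List String
  | [] => []
  | [x] => [x]
  | x :: y :: rest =>
    match tDict.get? x with
    | some p =>
      if strIsupper y || y == "a" then
        strMul (PySem.Str.upper y) p :: answer rest
      else
        x :: answer (y :: rest)
    | none => x :: answer (y :: rest)
termination_by xs => xs.length

-- rem_elems as a recursion over the marks (j = number of pops already done)
def remRec : List String → List Int → Int → List String
  | tl, [], _ => tl
  | tl, q :: qs, j =>
    remRec (match PySem.List.pop? tl (q - j) with
            | some pr => pr.2
            | none => tl) qs (j + 1)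

theorem tGet_eq (y : String) :
    tDict.get? y = if y = "single" then some 1 else if y = "double" then some 2
      else if y = "triple" then some 3 else none := by
  have h : tDict = PySem.Dict.mk [("single", (1:Int)), ("double", 2), ("triple", 3)] := by decide
  rw [h]
  simp only [PySem.Dict.get?_mk_cons]
  split_ifs with h1 h2 h3 <;> simp_all [PySem.Dict.get?]
theorem key_none_of_cond (y : String) (h : (strIsupper y || y == "a") = true) :
    tDict.get? y = none := by
  rw [tGet_eq]
  split_ifs with h1 h2 h3 <;> first | rfl | (subst_vars; revert h; decide)
theorem getD_append_len {α : Type} (pre l : List α) (x : α) (d : α) :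
    PySem.List.pyGetD (pre ++ x :: l) ((pre.length : Nat) : Int) d = x := by
  simp [PySem.List.pyGetD_natCast, List.getD_eq_getElem?_getD]
theorem getD_append_len1 {α : Type} (pre l : List α) (x y : α) (d : α) :
    PySem.List.pyGetD (pre ++ x :: y :: l) ((pre.length : Int) + 1) d = y := by
  have h := getD_append_len (pre ++ [x]) l y d
  simpa using h
theorem eraseIdx_append_len {α : Type} (pre l : List α) (x : α) :
    (pre ++ x :: l).eraseIdx pre.length = pre ++ l := by
  induction pre with
  | nil => rfl
  | cons a pre ih => simp [ih]
theorem remElems_gen : ∀ (r2 r1 : List Int) (tl : List String),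
    (PySem.List.pyRange (r1.length : Int) (((r1 ++ r2).length : Nat) : Int) 1).foldl
      (fun tl i =>
        match PySem.List.pop? tl (PySem.List.pyGetD (r1 ++ r2) i 0 - i) with
        | some pr => pr.2
        | none => tl) tl
      = remRec tl r2 (r1.length : Int) := by
  intro r2
  induction r2 with
  | nil =>
    intro r1 tl
    rw [PySem.List.pyRange_one_eq_nil (by simp)]
    rfl
  | cons q qs ih =>
    intro r1 tl
    rw [PySem.List.pyRange_one_cons (by simp only [List.length_append, List.length_cons]; push_cast; omega)]
    rw [List.foldl_cons]
    rw [show ((r1.length : Nat) : Int) = ((r1.length : Nat) : Int) from rfl]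
    rw [getD_append_len r1 qs q 0]
    have h1 := ih (r1 ++ [q]) (match PySem.List.pop? tl (q - (r1.length : Int)) with
            | some pr => pr.2
            | none => tl)
    simp only [List.append_assoc, List.cons_append, List.nil_append, List.length_append,
      List.length_cons, List.length_nil] at h1 ⊢
    push_cast at h1 ⊢
    rw [h1]
    rfl
theorem remRec_phase1S (m : Nat) : ∀ (suf : List String), suf.length ≤ m →
    ∀ (pre : List String) (j k : Int), k = (pre.length : Int) + j →
    remRec (pre ++ (phase1S suf k).1) (phase1S suf k).2 j = pre ++ answer suf := by
  induction m with
  | zero =>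
    intro suf hle pre j k hk
    have hsuf : suf = [] := List.length_eq_zero_iff.mp (by omega)
    subst hsuf
    simp [phase1S, answer, remRec]
  | succ m ih =>
    intro suf hle pre j k hk
    cases suf with
    | nil => simp [phase1S, answer, remRec]
    | cons x suf' =>
      cases suf' with
      | nil => simp [phase1S, answer, remRec]
      | cons y rest =>
        simp only [List.length_cons] at hle
        cases hxk : tDict.get? x with
        | none =>
          simp only [phase1S, hxk]
          have h1 := ih (y :: rest) (by simp only [List.length_cons]; omega) (pre ++ [x]) j (k + 1)
            (by simp only [List.length_append, List.length_cons, List.length_nil]; push_cast; omega)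
          simp only [List.append_assoc, List.cons_append, List.nil_append] at h1
          rw [h1]
          simp [answer, hxk]
        | some p =>
          rcases Bool.eq_false_or_eq_true (strIsupper y || y == "a") with hcond | hcond
          · -- trigger
            simp only [phase1S, hxk, hcond, if_true]
            rw [remRec]
            have hidx : k + 1 - j = ((pre.length + 1 : Nat) : Int) := by push_cast; omega
            rw [hidx]
            have herase : (pre ++ strMul (PySem.Str.upper y) p :: y :: (phase1S rest (k + 2)).1).eraseIdx (pre.length + 1)
                = pre ++ strMul (PySem.Str.upper y) p :: (phase1S rest (k + 2)).1 := by
              have h := eraseIdx_append_len (pre ++ [strMul (PySem.Str.upper y) p]) (phase1S rest (k + 2)).1 y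
              simpa using h
            have hpop : (match PySem.List.pop? (pre ++ strMul (PySem.Str.upper y) p :: y :: (phase1S rest (k + 2)).1) ((pre.length + 1 : Nat) : Int) with
                | some pr => pr.2
                | none => pre ++ strMul (PySem.Str.upper y) p :: y :: (phase1S rest (k + 2)).1)
                = pre ++ strMul (PySem.Str.upper y) p :: (phase1S rest (k + 2)).1 := by
              rw [PySem.List.pop?_natCast (pre ++ strMul (PySem.Str.upper y) p :: y :: (phase1S rest (k + 2)).1) (pre.length + 1) (by simp)]
              simpa using herase
            rw [hpop]
            have h1 := ih rest (by omega) (pre ++ [strMul (PySem.Str.upper y) p]) (j + 1) (k + 2)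
              (by simp only [List.length_append, List.length_cons, List.length_nil]; push_cast; omega)
            simp only [List.append_assoc, List.cons_append, List.nil_append] at h1
            rw [h1]
            simp [answer, hxk, hcond]
          · -- no trigger
            simp only [phase1S, hxk, hcond, if_false, Bool.false_eq_true]
            have h1 := ih (y :: rest) (by simp only [List.length_cons]; omega) (pre ++ [x]) j (k + 1)
              (by simp only [List.length_append, List.length_cons, List.length_nil]; push_cast; omega)
            simp only [List.append_assoc, List.cons_append, List.nil_append] at h1
            rw [h1]
            simp [answer, hxk, hcond]
theorem altGo_eq (m : Nat) : ∀ (suf : List String), suf.length ≤ m → ∀ (pre : List String),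
    altGo (pre ++ suf) (pre ++ suf).length pre.length = answer suf := by
  induction m with
  | zero =>
    intro suf hle pre
    have hsuf : suf = [] := List.length_eq_zero_iff.mp (by omega)
    subst hsuf
    rw [altGo]
    simp [answer]
  | succ m ih =>
    intro suf hle pre
    cases suf with
    | nil =>
      rw [altGo]
      simp [answer]
    | cons x suf' =>
      cases suf' with
      | nil =>
        rw [altGo]
        rw [dif_pos (by simp only [List.length_append, List.length_cons, List.length_nil]; omega)]
        rw [getD_append_len]
        have h1 := ih [] (by simp) (pre ++ [x])
        simp only [List.append_nil] at h1
        cases hxk : tDict.get? x with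
        | none =>
          simp only [hxk]
          rw [show pre.length + 1 = (pre ++ [x]).length from by simp]
          rw [h1]
          simp [answer]
        | some p =>
          simp only [hxk]
          rw [if_neg (by simp)]
          rw [show pre.length + 1 = (pre ++ [x]).length from by simp]
          rw [h1]
          simp [answer]
      | cons y rest =>
        simp only [List.length_cons] at hle
        rw [altGo]
        rw [dif_pos (by simp only [List.length_append, List.length_cons]; omega)]
        rw [getD_append_len, getD_append_len1]
        cases hxk : tDict.get? x with
        | none =>
          simp only [hxk]
          have h1 := ih (y :: rest) (by simp only [List.length_cons]; omega) (pre ++ [x])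
          rw [show pre ++ x :: y :: rest = (pre ++ [x]) ++ y :: rest from by simp]
          rw [show pre.length + 1 = (pre ++ [x]).length from by simp]
          rw [h1]
          simp [answer, hxk]
        | some p =>
          simp only [hxk]
          rcases Bool.eq_false_or_eq_true (strIsupper y || y == "a") with hcond | hcond
          · -- trigger
            rw [if_pos (by simp only [hcond, Bool.and_true, decide_eq_true_eq,
                  List.length_append, List.length_cons]; omega)]
            have h1 := ih rest (by omega) (pre ++ [x, y])
            rw [show pre ++ x :: y :: rest = (pre ++ [x, y]) ++ rest from by simp]
            rw [show pre.length + 2 = (pre ++ [x, y]).length from by simp]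
            rw [h1]
            simp [answer, hxk, hcond]
          · -- no trigger
            rw [if_neg (by simp [hcond])]
            have h1 := ih (y :: rest) (by simp only [List.length_cons]; omega) (pre ++ [x])
            rw [show pre ++ x :: y :: rest = (pre ++ [x]) ++ y :: rest from by simp]
            rw [show pre.length + 1 = (pre ++ [x]).length from by simp]
            rw [h1]
            simp [answer, hxk, hcond]
theorem set_append_len {α : Type} (pre l : List α) (x v : α) :
    (pre ++ x :: l).set pre.length v = pre ++ v :: l := by
  induction pre with
  | nil => rfl
  | cons a pre ih => simp [ih]
theorem phase1_eq (m : Nat) : ∀ (suf : List String), suf.length ≤ m → ∀ (pre : List String) (r0 : List Int),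
    (PySem.List.pyRange (pre.length : Int) ((pre.length : Int) + (suf.length : Int) - 1) 1).foldl stepA (pre ++ suf, r0)
      = (pre ++ (phase1S suf (pre.length : Int)).1, r0 ++ (phase1S suf (pre.length : Int)).2) := by
  induction m with
  | zero =>
    intro suf hle pre r0
    have hsuf : suf = [] := List.length_eq_zero_iff.mp (by omega)
    subst hsuf
    rw [PySem.List.pyRange_one_eq_nil (by simp)]
    simp [phase1S]
  | succ m ih =>
    intro suf hle pre r0
    cases suf with
    | nil =>
      rw [PySem.List.pyRange_one_eq_nil (by simp)]
      simp [phase1S]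
    | cons x suf' =>
      cases suf' with
      | nil =>
        rw [PySem.List.pyRange_one_eq_nil (by simp)]
        simp [phase1S]
      | cons y rest =>
        simp only [List.length_cons] at hle ⊢
        push_cast
        rw [PySem.List.pyRange_one_cons (by omega)]
        rw [List.foldl_cons]
        cases hxk : tDict.get? x with
        | none =>
          have hstep : stepA (pre ++ x :: y :: rest, r0) ((pre.length : Nat) : Int) = (pre ++ x :: y :: rest, r0) := by
            simp [stepA, getD_append_len, hxk]
          rw [hstep]
          have h1 := ih (y :: rest) (by simp only [List.length_cons]; omega) (pre ++ [x]) r0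
          simp only [List.length_cons, List.length_append, List.length_nil, List.append_assoc,
            List.cons_append, List.nil_append] at h1
          push_cast at h1
          rw [show (pre.length : Int) + 1 + (rest.length + 1) - 1 = (pre.length : Int) + (rest.length + 1 + 1) - 1 by ring] at h1
          rw [h1]
          simp [phase1S, hxk]
        | some p =>
          rcases Bool.eq_false_or_eq_true (strIsupper y || y == "a") with hcond | hcond
          · -- trigger
            have hstep : stepA (pre ++ x :: y :: rest, r0) ((pre.length : Nat) : Int)
                = (pre ++ strMul (PySem.Str.upper y) p :: y :: rest, r0 ++ [(pre.length : Int) + 1]) := by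
              simp only [stepA, getD_append_len, getD_append_len1, hxk, hcond, if_true]
              simp [PySem.List.pySetD_natCast, set_append_len]
            rw [hstep]
            cases rest with
            | nil =>
              rw [PySem.List.pyRange_one_eq_nil (by simp only [List.length_nil]; push_cast; omega)]
              simp [phase1S, hxk, hcond]
            | cons z rest' =>
              simp only [List.length_cons] at hle ⊢
              push_cast
              rw [PySem.List.pyRange_one_cons (by omega)]
              rw [List.foldl_cons]
              have hyk : tDict.get? y = none := key_none_of_cond y hcond
              have hstep2 : stepA (pre ++ strMul (PySem.Str.upper y) p :: y :: z :: rest', r0 ++ [(pre.length : Int) + 1]) ((pre.length : Int) + 1)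
                  = (pre ++ strMul (PySem.Str.upper y) p :: y :: z :: rest', r0 ++ [(pre.length : Int) + 1]) := by
                simp [stepA, getD_append_len1, hyk]
              rw [hstep2]
              have h1 := ih (z :: rest') (by simp only [List.length_cons]; omega) (pre ++ [strMul (PySem.Str.upper y) p, y]) (r0 ++ [(pre.length : Int) + 1])
              simp only [List.length_cons, List.length_append, List.length_nil, List.append_assoc,
                List.cons_append, List.nil_append] at h1
              push_cast at h1
              rw [show (pre.length : Int) + 2 = (pre.length : Int) + 1 + 1 by ring] at h1
              rw [show (pre.length : Int) + 1 + 1 + (rest'.length + 1) - 1 = (pre.length : Int) + (rest'.length + 1 + 1 + 1) - 1 by ring] at h1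
              rw [h1]
              simp [phase1S, hxk, hcond, show (pre.length : Int) + 1 + 1 = (pre.length : Int) + 2 from by ring]
          · -- condition false: no-op step
            have hstep : stepA (pre ++ x :: y :: rest, r0) ((pre.length : Nat) : Int) = (pre ++ x :: y :: rest, r0) := by
              simp [stepA, getD_append_len, getD_append_len1, hxk, hcond]
            rw [hstep]
            have h1 := ih (y :: rest) (by simp only [List.length_cons]; omega) (pre ++ [x]) r0
            simp only [List.length_cons, List.length_append, List.length_nil, List.append_assoc,
              List.cons_append, List.nil_append] at h1
            push_cast at h1
            rw [show (pre.length : Int) + 1 + (rest.length + 1) - 1 = (pre.length : Int) + (rest.length + 1 + 1) - 1 by ring] at h1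
            rw [h1]
            simp [phase1S, hxk, hcond]

theorem some_name_eq_answer (xs : List String) : some_name xs = answer xs := by
  have hp := phase1_eq xs.length xs le_rfl [] []
  simp only [List.length_nil, Nat.cast_zero, List.nil_append, zero_add] at hp
  have hr := remElems_gen (phase1S xs 0).2 [] (phase1S xs 0).1
  simp only [List.nil_append, List.length_nil, Nat.cast_zero] at hr
  have hrp := remRec_phase1S xs.length xs le_rfl [] 0 0 (by simp)
  simp only [List.nil_append] at hrp
  unfold some_name remElems
  rw [hp]
  rw [hr, hrp]

theorem some_name_alt_eq_answer (xs : List String) : some_name_alt xs = answer xs := by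
  have h := altGo_eq xs.length xs le_rfl []
  simp only [List.nil_append, List.length_nil] at h
  unfold some_name_alt
  exact h

-- ===== VERDICT (by name: the statement is the Claim_ definition above) =====
theorem some_name_spec : Claim_equal_some_name := by
  intro xs _
  unfold Spec_some_name
  rw [some_name_eq_answer, some_name_alt_eq_answer]
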